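-- pv_equiv track=rewrite | github.com/WMaia9/Introducao-a-Ciencia-da-Computacao-com-Python | Curso2/Lista6/ex003_elefantes.py | elefantes
-- ===== SOURCE A (Python) =====
-- def incomodam(n, lista = ""):
--     if n < 0:
--         return lista
--     else:
--         if n == 0:
--             return lista
--         else:
--             return "incomodam " + incomodam(n -1)
--
-- def elefantes(n, i = 1):
--     if n < 1:
--         return ""
--     else:
--         if i == 1:
--             return "Um elefante incomoda muita gente" + (elefantes(n-1, i+1))
--         elif n == 1:
--             return "\n" + str(i) + " elefantes " +  incomodam(i) + "muita mais"
--         else: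
--             return   "\n" + str(i) + " elefantes " +  incomodam(i) + "muita mais\n" + str(i) + " elefantes incomodam muita gente" + elefantes(n-1, i+1)
-- ===== SOURCE B (Python) =====
-- def elefantes(n, i=1):
--     if n < 1:
--         return ""
--     parts = []
--     while True:
--         if i == 1:
--             parts.append("Um elefante incomoda muita gente")
--             n -= 1
--             i += 1
--         elif n == 1:
--             parts.append("\n" + str(i) + " elefantes " + "incomodam " * i + "muita mais")
--             break
--         else:
--             parts.append("\n" + str(i) + " elefantes " + "incomodam " * i + "muita mais\n"
--                          + str(i) + " elefantes incomodam muita gente")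
--             n -= 1
--             i += 1
--         if n < 1:
--             break
--     return "".join(parts)
-- ===== Notes on version B (the rewrite author's own statement) =====
-- stated objective: faster
-- what changed: Replaces the double recursion (recursive incomodam helper, recursive elefantes gluing each verse onto the fully built tail with +) by one iterative loop that appends verse strings to a parts list, uses the closed form 'incomodam ' * i, and joins the parts once at the end.
import Mathlib
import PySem

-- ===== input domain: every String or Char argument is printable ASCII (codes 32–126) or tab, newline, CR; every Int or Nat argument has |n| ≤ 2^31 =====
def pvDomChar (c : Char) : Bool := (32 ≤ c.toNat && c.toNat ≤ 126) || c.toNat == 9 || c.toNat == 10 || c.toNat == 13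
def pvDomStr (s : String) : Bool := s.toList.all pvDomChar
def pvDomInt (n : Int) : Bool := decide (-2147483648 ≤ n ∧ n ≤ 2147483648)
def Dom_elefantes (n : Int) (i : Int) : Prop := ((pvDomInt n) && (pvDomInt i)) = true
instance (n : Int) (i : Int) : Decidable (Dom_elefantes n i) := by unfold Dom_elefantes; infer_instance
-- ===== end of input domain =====

-- B replaces A's double recursion (which re-copies the tail at every + ) by one
-- iterative loop over a parts list with a closed-form "incomodam " * i, joined once;
-- same return value on every input, stated as Claim_equal_elefantes.

-- ===== PORT A =====
-- recursive helper incomodam (ported on List Char; the default lista = "" is [])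
def incomodamChars (n : Int) (lista : List Char) : List Char :=
  if n < 0 then lista
  else if n = 0 then lista
  else "incomodam ".toList ++ incomodamChars (n - 1) []
termination_by n.toNat
decreasing_by omega

def elefantesChars (n : Int) (i : Int) : List Char :=
  if n < 1 then []
  else if i = 1 then
    "Um elefante incomoda muita gente".toList ++ elefantesChars (n - 1) (i + 1)
  else if n = 1 then
    "\n".toList ++ PySem.Int.toChars i ++ " elefantes ".toList ++ incomodamChars i []
      ++ "muita mais".toList
  else
    "\n".toList ++ PySem.Int.toChars i ++ " elefantes ".toList ++ incomodamChars i []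
      ++ "muita mais\n".toList ++ PySem.Int.toChars i
      ++ " elefantes incomodam muita gente".toList ++ elefantesChars (n - 1) (i + 1)
termination_by n.toNat
decreasing_by all_goals omega

def elefantes (n : Int) (i : Int) : String := String.ofList (elefantesChars n i)

-- ===== PORT B =====
-- the while-True loop of Source B: appends line chunks to parts, breaks on n == 1 or when n drops below 1
def elefantesLoop (n : Int) (i : Int) (parts : List (List Char)) : List (List Char) :=
  if i = 1 then
    let parts := parts ++ ["Um elefante incomoda muita gente".toList]
    if n - 1 < 1 then parts else elefantesLoop (n - 1) (i + 1) parts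
  else if n = 1 then
    parts ++ ["\n".toList ++ PySem.Int.toChars i ++ " elefantes ".toList
      ++ PySem.List.pyRepeat "incomodam ".toList i ++ "muita mais".toList]
  else
    let parts := parts ++ ["\n".toList ++ PySem.Int.toChars i ++ " elefantes ".toList
      ++ PySem.List.pyRepeat "incomodam ".toList i ++ "muita mais\n".toList
      ++ PySem.Int.toChars i ++ " elefantes incomodam muita gente".toList]
    if n - 1 < 1 then parts else elefantesLoop (n - 1) (i + 1) parts
termination_by n.toNat
decreasing_by all_goals omega

def elefantes_alt (n : Int) (i : Int) : String :=
  if n < 1 then ""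
  else String.ofList (PySem.Chars.join [] (elefantesLoop n i []))

-- ===== PRECONDITION & SPEC =====
-- A recurses once per verse and i more times inside incomodam, so it raises
-- RecursionError exactly when that depth (about 2n+i, or n when the incomodam calls
-- stay shallow) reaches the interpreter's stack limit; Pre_ excludes those deep inputs
-- with a small margin below the exact interpreter-dependent limit (B agrees with A on
-- every returning input, including the thin margin band).
def Pre_elefantes (n : Int) (i : Int) : Prop := n < 1 ∨ (n ≤ 9000 ∧ 2 * n + i ≤ 9000)
instance (n : Int) (i : Int) : Decidable (Pre_elefantes n i) := by unfold Pre_elefantes; infer_instance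
def pvWitness_elefantes : Int × Int := (3, 1)

def Spec_elefantes (n : Int) (i : Int) (out : String) : Prop := out = elefantes_alt n i
instance (n : Int) (i : Int) (out : String) : Decidable (Spec_elefantes n i out) := by unfold Spec_elefantes; infer_instance

-- ===== CLAIM (what is proved, stated in full; the proofs are below) =====
def Claim_equal_elefantes : Prop := ∀ (n : Int) (i : Int), Dom_elefantes n i → Pre_elefantes n i → Spec_elefantes n i (elefantes n i)

-- ===== LEMMAS AND PROOFS =====

-- "incomodam " * i equals A's recursive helper
theorem incomodam_eq_pyRepeat (i : Int) :
    incomodamChars i [] = PySem.List.pyRepeat "incomodam ".toList i := by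
  rw [PySem.List.pyRepeat]
  induction h : i.toNat generalizing i with
  | zero =>
    rw [incomodamChars]
    have : i ≤ 0 := by omega
    simp [List.replicate]
    omega
  | succ k ih =>
    rw [incomodamChars]
    have h1 : ¬ i < 0 := by omega
    have h2 : ¬ i = 0 := by omega
    simp only [h1, h2, if_false]
    have : (i - 1).toNat = k := by omega
    rw [ih _ this]
    rw [List.replicate_succ, List.flatten_cons]

theorem join_nil_append (xs : List (List Char)) (y : List Char) :
    PySem.Chars.join [] (xs ++ [y]) = PySem.Chars.join [] xs ++ y := by
  induction xs with
  | nil => simp [PySem.Chars.join_nil, PySem.Chars.join_singleton]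
  | cons p rest ih =>
    cases rest with
    | nil => simp [PySem.Chars.join_singleton, PySem.Chars.join_cons_cons]
    | cons q r =>
      rw [List.cons_append, List.cons_append, PySem.Chars.join_cons_cons,
        PySem.Chars.join_cons_cons]
      rw [← List.cons_append, ih]
      simp

-- loop invariant: the join of the loop's result is the join of the accumulator
-- followed by exactly A's recursive output
theorem loop_invariant (k : Nat) : ∀ (n i : Int) (parts : List (List Char)),
    n.toNat = k → 1 ≤ n →
    PySem.Chars.join [] (elefantesLoop n i parts)
      = PySem.Chars.join [] parts ++ elefantesChars n i := by
  induction k with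
  | zero => intro n i parts hk hn; omega
  | succ k ih =>
    intro n i parts hk hn
    rw [elefantesLoop, elefantesChars]
    have hn1 : ¬ n < 1 := by omega
    simp only [hn1, if_false]
    by_cases hi : i = 1
    · rw [if_pos hi, if_pos hi]
      by_cases hb : n - 1 < 1
      · have h0 : elefantesChars (n - 1) (i + 1) = [] := by
          rw [elefantesChars]; simp [hb]
        simp only [hb, if_true, h0, List.append_nil]
        exact join_nil_append _ _
      · simp only [hb, if_false]
        rw [ih (n - 1) (i + 1) _ (by omega) (by omega), join_nil_append,
          List.append_assoc]
    · simp only [hi, if_false]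
      by_cases hb : n = 1
      · simp only [hb, if_true]
        rw [join_nil_append, incomodam_eq_pyRepeat]
      · simp only [hb, if_false]
        have hb' : ¬ n - 1 < 1 := by omega
        simp only [hb', if_false]
        rw [ih (n - 1) (i + 1) _ (by omega) (by omega), join_nil_append,
          incomodam_eq_pyRepeat]
        simp only [List.append_assoc]

-- ===== VERDICT (by name: the statement is the Claim_ definition above) =====
theorem elefantes_spec : Claim_equal_elefantes := by
  intro n i _ _
  unfold Spec_elefantes elefantes elefantes_alt
  by_cases h : n < 1
  · rw [elefantesChars]
    simp [h]
  · simp only [h, if_false]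
    rw [loop_invariant n.toNat n i [] rfl (by omega), PySem.Chars.join_nil,
      List.nil_append]
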